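-- pv_equiv track=rewrite | github.com/joostone-ahn/sim-at-command | src/app.py | _decode_iccid
-- ===== SOURCE A (Python) =====
-- def _decode_iccid(hex_data: str) -> str:
--     """Decode ICCID from EF.ICCID hex (swap nibbles)."""
--     if not hex_data or len(hex_data) < 4:
--         return ''
--     digits = ''
--     for i in range(0, len(hex_data), 2):
--         lo = hex_data[i+1] if i+1 < len(hex_data) else 'F'
--         hi = hex_data[i]
--         if lo != 'F' and lo != 'f':
--             digits += lo
--         if hi != 'F' and hi != 'f':
--             digits += hi
--     return digits
-- ===== SOURCE B (Python) =====
-- def _decode_iccid(hex_data: str) -> str: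
--     """Decode ICCID from EF.ICCID hex (swap nibbles)."""
--     if not hex_data or len(hex_data) < 4:
--         return ''
--     hi = hex_data[::2]                      # high nibbles (even positions)
--     lo = hex_data[1::2]                     # low nibbles (odd positions)
--     lo = lo + 'F' * (len(hi) - len(lo))     # ljust: pad the low-nibble column with filler
--     swapped = ''.join(a + b for a, b in zip(lo, hi))
--     return ''.join(c for c in swapped if c not in 'Ff')
-- ===== Notes on version B (the rewrite author's own statement) =====
-- stated objective: alternative
-- what changed: Replaces A's row-wise indexed loop (step-2 range with per-character branches) by a column-wise decomposition: strided slices extract the high- and low-nibble columns, the low column is right-padded with the filler nibble, zip re-joins the columns, and a final pass filters out filler.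
import Mathlib
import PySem

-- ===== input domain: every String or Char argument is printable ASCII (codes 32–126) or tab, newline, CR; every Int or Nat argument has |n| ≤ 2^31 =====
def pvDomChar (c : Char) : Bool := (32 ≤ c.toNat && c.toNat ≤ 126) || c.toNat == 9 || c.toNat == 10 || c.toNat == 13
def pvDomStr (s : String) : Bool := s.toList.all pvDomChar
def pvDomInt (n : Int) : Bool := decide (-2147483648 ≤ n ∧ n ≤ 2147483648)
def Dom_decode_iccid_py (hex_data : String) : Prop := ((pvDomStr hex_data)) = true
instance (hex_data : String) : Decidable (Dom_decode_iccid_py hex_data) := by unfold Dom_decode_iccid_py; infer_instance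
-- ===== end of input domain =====

-- B decodes column-wise instead of A's row-wise indexed loop: strided slices split the string
-- into the high- and low-nibble columns, the low column is right-padded with the filler nibble,
-- the columns are re-joined with zip, and filler is filtered out; same cost, different traversal.

-- ===== PORT A =====
-- literal port of A: one loop over range(0, len, 2); indices are always in range when
-- pyGet? is consulted (i < len; i+1 only under the guard), so the .getD 'F' default is unreachable.
def decode_iccid_py (hex_data : String) : String :=
  let cs := hex_data.toList
  if cs.length = 0 ∨ cs.length < 4 then "" else
  let digits := (PySem.List.pyRange 0 cs.length 2).foldl (fun digits i =>
    let lo : Char := if i + 1 < (cs.length : Int) then (PySem.List.pyGet? cs (i + 1)).getD 'F' else 'F'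
    let hi : Char := (PySem.List.pyGet? cs i).getD 'F'
    let digits := if lo ≠ 'F' ∧ lo ≠ 'f' then digits ++ [lo] else digits
    if hi ≠ 'F' ∧ hi ≠ 'f' then digits ++ [hi] else digits) []
  String.mk digits

-- ===== PORT B =====
-- literal port of Source B: hex_data[::2] / hex_data[1::2] are slice? with step 2 (step ≠ 0, so the
-- .getD [] default is unreachable); 'F' * (len(hi) - len(lo)) is List.replicate on the clamped
-- Nat difference (Python's '' on a non-positive count = replicate 0); the generator joins are
-- a flatMap over zip and a filter.
def decode_iccid_py_alt (hex_data : String) : String :=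
  let cs := hex_data.toList
  if cs.length = 0 ∨ cs.length < 4 then "" else
  let hi := (PySem.List.slice? cs none none 2).getD []
  let lo := (PySem.List.slice? cs (some 1) none 2).getD []
  let lo := lo ++ List.replicate (hi.length - lo.length) 'F'
  let swapped := (lo.zip hi).flatMap (fun ab => [ab.1, ab.2])
  String.mk (swapped.filter (fun c => c ≠ 'F' && c ≠ 'f'))

-- ===== PRECONDITION & SPEC =====
def Spec_decode_iccid_py (hex_data : String) (out : String) : Prop := out = decode_iccid_py_alt hex_data
instance (hex_data : String) (out : String) : Decidable (Spec_decode_iccid_py hex_data out) := by unfold Spec_decode_iccid_py; infer_instance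

-- ===== CLAIM (what is proved, stated in full; the proofs are below) =====
def Claim_equal_decode_iccid_py : Prop := ∀ (hex_data : String), Dom_decode_iccid_py hex_data → Spec_decode_iccid_py hex_data (decode_iccid_py hex_data)

-- ===== LEMMAS AND PROOFS =====

-- the characters at even positions (proof-only helper)
def pvEveryOther : List Char → List Char
  | [] => []
  | [a] => [a]
  | a :: _ :: r => a :: pvEveryOther r

-- the common shape of both results: per pair, the filtered swapped pair
def pvSpecA : List Char → List Char
  | [] => []
  | [a] => List.filter (fun c => c ≠ 'F' && c ≠ 'f') [a]
  | a :: b :: r => List.filter (fun c => c ≠ 'F' && c ≠ 'f') [b, a] ++ pvSpecA r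

theorem pvEveryOther_cons (b : Char) (r : List Char) :
    pvEveryOther (b :: r) = b :: pvEveryOther r.tail := by
  cases r <;> simp [pvEveryOther]

theorem pvFilterMap_even (xs : List Char) :
    (List.range ((xs.length + 1) / 2)).filterMap (fun k => xs[2 * k]?) = pvEveryOther xs := by
  induction xs using pvEveryOther.induct with
  | case1 => rfl
  | case2 a => simp [pvEveryOther, List.range_succ]
  | case3 a b r ih =>
    have hc : ((a :: b :: r).length + 1) / 2 = (r.length + 1) / 2 + 1 := by
      simp [List.length_cons]; omega
    rw [hc, List.range_succ_eq_map, List.filterMap_cons, List.filterMap_map]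
    simp only [Function.comp_def]
    have hsh : ∀ k : Nat, (a :: b :: r)[2 * (k + 1)]? = r[2 * k]? := by
      intro k
      have h2 : 2 * (k + 1) = 2 * k + 1 + 1 := by omega
      rw [h2]; simp
    simp only [hsh, ih]
    rfl

theorem pvFilterMap_odd (xs : List Char) :
    (List.range (xs.length / 2)).filterMap (fun k => xs[1 + 2 * k]?) = pvEveryOther xs.tail := by
  induction xs using pvEveryOther.induct with
  | case1 => rfl
  | case2 a => simp [pvEveryOther]
  | case3 a b r ih =>
    have hc : (a :: b :: r).length / 2 = r.length / 2 + 1 := by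
      simp [List.length_cons]; omega
    rw [hc, List.range_succ_eq_map, List.filterMap_cons, List.filterMap_map]
    simp only [Function.comp_def]
    have hsh : ∀ k : Nat, (a :: b :: r)[1 + 2 * (k + 1)]? = r[1 + 2 * k]? := by
      intro k
      have h2 : 1 + 2 * (k + 1) = 1 + 2 * k + 1 + 1 := by omega
      rw [h2]; simp
    simp only [hsh, ih]
    simp [pvEveryOther_cons]

-- hex_data[::2]: the even-position column
theorem pvSlice_even (xs : List Char) :
    PySem.List.slice? xs none none 2 = some (pvEveryOther xs) := by
  rw [← pvFilterMap_even]
  simp only [PySem.List.slice?, PySem.List.sliceIndices]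
  norm_num
  have h2 : (if 0 < xs.length then (((xs.length : Int) + 2 - 1) / 2).toNat else 0) = (xs.length + 1) / 2 := by
    split_ifs with h <;> omega
  rw [h2]
  apply List.filterMap_congr
  intro k _
  congr 1

-- hex_data[1::2]: the odd-position column
theorem pvSlice_odd (xs : List Char) :
    PySem.List.slice? xs (some 1) none 2 = some (pvEveryOther xs.tail) := by
  rw [← pvFilterMap_odd]
  simp only [PySem.List.slice?, PySem.List.sliceIndices]
  norm_num
  have h2 : (if 1 < xs.length then (((xs.length : Int) - min 1 (xs.length : Int) + 2 - 1) / 2).toNat else 0) = xs.length / 2 := by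
    split_ifs with h <;> omega
  rw [h2]
  apply List.filterMap_congr
  intro k hk
  have hlen : 1 ≤ xs.length := by
    simp [List.mem_range] at hk
    omega
  have hmin : min (1 : Int) (xs.length : Int) = 1 := by omega
  rw [hmin]
  congr 1

-- range(0, n, 2) peels its first index for n ≥ 1
theorem pvPyRange_two_cons (n : Int) (h : 1 ≤ n) :
    PySem.List.pyRange 0 n 2 = 0 :: (PySem.List.pyRange 0 (n - 2) 2).map (· + 2) := by
  rw [PySem.List.pyRange_of_pos 0 n (by norm_num), PySem.List.pyRange_of_pos 0 (n - 2) (by norm_num)]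
  have hc : (if (0 : Int) < n then ((n - 0 + 2 - 1) / 2).toNat else 0)
      = (if (0 : Int) < n - 2 then ((n - 2 - 0 + 2 - 1) / 2).toNat else 0) + 1 := by
    split_ifs <;> omega
  rw [hc, List.range_succ_eq_map, List.map_cons, List.map_map, List.map_map]
  norm_num
  intro k _
  ring

theorem pvFlatMap_congr_mem {α β : Type} (l : List α) (f g : α → List β)
    (h : ∀ x ∈ l, f x = g x) : l.flatMap f = l.flatMap g := by
  induction l with
  | nil => rfl
  | cons x xs ih =>
    simp only [List.flatMap_cons]
    rw [h x (by simp), ih (fun y hy => h y (by simp [hy]))]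

theorem pvPyGet_cons2 (x y : Char) (r : List Char) (i : Int) (h : 0 ≤ i) :
    PySem.List.pyGet? (x :: y :: r) (i + 2) = PySem.List.pyGet? r i := by
  rw [PySem.List.pyGet?_of_nonneg _ (by omega), PySem.List.pyGet?_of_nonneg _ h]
  have h2 : (i + 2).toNat = i.toNat + 1 + 1 := by omega
  rw [h2]; simp

-- A's per-pair contributions, pair by pair
theorem pvA_spec (cs : List Char) :
    (PySem.List.pyRange 0 (cs.length : Int) 2).flatMap (fun i =>
      ([(if i + 1 < (cs.length : Int) then (PySem.List.pyGet? cs (i + 1)).getD 'F' else 'F'),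
        (PySem.List.pyGet? cs i).getD 'F']).filter (fun c => c ≠ 'F' && c ≠ 'f')) = pvSpecA cs := by
  induction cs using pvEveryOther.induct with
  | case1 => rfl
  | case2 a =>
    have hl : (([a].length : Int)) = 1 := by norm_num
    have h1 : PySem.List.pyRange 0 (1 : Int) 2 = [0] := by decide
    rw [hl, h1, List.flatMap_cons]
    rw [if_neg (by norm_num), PySem.List.pyGet?_of_nonneg _ (by norm_num)]
    simp [pvSpecA]
  | case3 a b r ih =>
    have hlen : ((a :: b :: r).length : Int) = (r.length : Int) + 2 := by
      simp [List.length_cons]; omega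
    rw [hlen, pvPyRange_two_cons _ (by omega)]
    have hsub : (r.length : Int) + 2 - 2 = (r.length : Int) := by ring
    rw [hsub, List.flatMap_cons, List.flatMap_map]
    have hhead : ([(if (0 : Int) + 1 < (r.length : Int) + 2 then (PySem.List.pyGet? (a :: b :: r) ((0 : Int) + 1)).getD 'F' else 'F'),
        (PySem.List.pyGet? (a :: b :: r) 0).getD 'F']).filter (fun c => c ≠ 'F' && c ≠ 'f')
        = List.filter (fun c => c ≠ 'F' && c ≠ 'f') [b, a] := by
      rw [if_pos (by omega), PySem.List.pyGet?_of_nonneg _ (by norm_num),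
        PySem.List.pyGet?_of_nonneg _ (by norm_num)]
      norm_num
    have htail : ∀ i ∈ PySem.List.pyRange 0 (r.length : Int) 2,
        ([(if i + 2 + 1 < (r.length : Int) + 2 then (PySem.List.pyGet? (a :: b :: r) (i + 2 + 1)).getD 'F' else 'F'),
          (PySem.List.pyGet? (a :: b :: r) (i + 2)).getD 'F']).filter (fun c => c ≠ 'F' && c ≠ 'f')
        = ([(if i + 1 < (r.length : Int) then (PySem.List.pyGet? r (i + 1)).getD 'F' else 'F'),
          (PySem.List.pyGet? r i).getD 'F']).filter (fun c => c ≠ 'F' && c ≠ 'f') := by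
      intro i hi
      rw [PySem.List.mem_pyRange_iff_of_pos (by norm_num)] at hi
      obtain ⟨hi0, _, _⟩ := hi
      have e1 : i + 2 + 1 = (i + 1) + 2 := by ring
      rw [e1, pvPyGet_cons2 _ _ _ _ (by omega), pvPyGet_cons2 _ _ _ _ hi0]
      by_cases hcase : i + 1 < (r.length : Int)
      · rw [if_pos (by omega), if_pos hcase]
      · rw [if_neg (by omega), if_neg hcase]
    rw [pvFlatMap_congr_mem _ _ _ htail, ih, hhead]
    rfl

-- B's zip of the padded columns, pair by pair
theorem pvB_spec (cs : List Char) :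
    (((pvEveryOther cs.tail ++ List.replicate ((pvEveryOther cs).length - (pvEveryOther cs.tail).length) 'F').zip
        (pvEveryOther cs)).flatMap (fun ab => [ab.1, ab.2])).filter (fun c => c ≠ 'F' && c ≠ 'f') = pvSpecA cs := by
  induction cs using pvEveryOther.induct with
  | case1 => rfl
  | case2 a => rfl
  | case3 a b r ih =>
    have h1 : pvEveryOther (a :: b :: r) = a :: pvEveryOther r := rfl
    have h2 : (a :: b :: r).tail = b :: r := rfl
    rw [h1, h2, pvEveryOther_cons]
    have h3 : (a :: pvEveryOther r).length - (b :: pvEveryOther r.tail).length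
        = (pvEveryOther r).length - (pvEveryOther r.tail).length := by
      simp [List.length_cons]
    rw [h3, List.cons_append, List.zip_cons_cons, List.flatMap_cons, List.filter_append, ih]
    rfl

theorem pvStepA_eq (acc : List Char) (lo hi : Char) :
    (if hi ≠ 'F' ∧ hi ≠ 'f' then (if lo ≠ 'F' ∧ lo ≠ 'f' then acc ++ [lo] else acc) ++ [hi]
     else (if lo ≠ 'F' ∧ lo ≠ 'f' then acc ++ [lo] else acc)) =
    acc ++ ([lo, hi].filter (fun c => c ≠ 'F' && c ≠ 'f')) := by
  simp only [List.filter_cons, List.filter_nil, Bool.and_eq_true, decide_eq_true_eq]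
  split_ifs <;> simp_all

theorem decode_iccid_py_eq : ∀ (hex_data : String),
    decode_iccid_py hex_data = decode_iccid_py_alt hex_data := by
  intro s
  unfold decode_iccid_py decode_iccid_py_alt
  by_cases hg : s.toList.length = 0 ∨ s.toList.length < 4
  · rw [if_pos hg, if_pos hg]
  · rw [if_neg hg, if_neg hg]
    simp only [pvSlice_even, pvSlice_odd, Option.getD_some]
    set cs := s.toList with hcs
    -- A's loop as a flatMap of per-pair filtered contributions
    have hA : (PySem.List.pyRange 0 cs.length 2).foldl (fun digits i =>
        let lo : Char := if i + 1 < (cs.length : Int) then (PySem.List.pyGet? cs (i + 1)).getD 'F' else 'F'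
        let hi : Char := (PySem.List.pyGet? cs i).getD 'F'
        let digits := if lo ≠ 'F' ∧ lo ≠ 'f' then digits ++ [lo] else digits
        if hi ≠ 'F' ∧ hi ≠ 'f' then digits ++ [hi] else digits) [] =
      (PySem.List.pyRange 0 cs.length 2).flatMap (fun i =>
        ([(if i + 1 < (cs.length : Int) then (PySem.List.pyGet? cs (i + 1)).getD 'F' else 'F'),
          (PySem.List.pyGet? cs i).getD 'F']).filter (fun c => c ≠ 'F' && c ≠ 'f')) := by
      rw [PySem.List.foldl_congr_mem _ _ (fun digits i =>
        digits ++ ([(if i + 1 < (cs.length : Int) then (PySem.List.pyGet? cs (i + 1)).getD 'F' else 'F'),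
          (PySem.List.pyGet? cs i).getD 'F']).filter (fun c => c ≠ 'F' && c ≠ 'f')) []
        (by
          intro acc i _
          exact pvStepA_eq acc _ _)]
      exact PySem.List.foldl_append_eq_flatMap _ _ _
    rw [hA, pvA_spec]
    exact congrArg String.mk (pvB_spec cs).symm

-- ===== VERDICT (by name: the statement is the Claim_ definition above) =====
theorem decode_iccid_py_spec : Claim_equal_decode_iccid_py := by
  intro s _
  unfold Spec_decode_iccid_py
  exact decode_iccid_py_eq s
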